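-- pv_equiv track=rewrite | github.com/mmiikeke/calligraphy-transform | code/calligraphy_resize.py | find_stroke
-- ===== SOURCE A (Python) =====
-- def find_stroke(data_cmd):
--     stroke = [0]
--     flag = data_cmd[0][-1]
--
--     for i, data in enumerate(data_cmd):
--         if flag != data[-1]:
--             stroke.append(i)
--             flag = data[-1]
--
--     return stroke
-- ===== SOURCE B (Python) =====
-- def _run_lengths(rows):
--     # lengths of maximal runs of equal last-element value (recursive grouping)
--     if not rows:
--         return []
--     key = rows[0][-1]
--     n = 1
--     while n < len(rows) and rows[n][-1] == key:
--         n += 1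
--     return [n] + _run_lengths(rows[n:])
--
--
-- def find_stroke(data_cmd):
--     lens = _run_lengths(data_cmd)
--     stroke, off = [0], 0
--     for L in lens[:-1]:
--         off += L
--         stroke.append(off)
--     return stroke
-- ===== Notes on version B (the rewrite author's own statement) =====
-- stated objective: alternative
-- what changed: Two-stage decomposition: first group the rows into maximal runs of equal last-element value and record the run lengths (recursive grouping), then emit the stroke boundaries as the prefix sums of all but the last run length; A instead appends indices directly during one stateful flag-tracking scan.
-- outside the precondition, e.g. on find_stroke([]): A raises IndexError, B returns [0]; on find_stroke([[]]): A raises IndexError, B raises IndexError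
import Mathlib
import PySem

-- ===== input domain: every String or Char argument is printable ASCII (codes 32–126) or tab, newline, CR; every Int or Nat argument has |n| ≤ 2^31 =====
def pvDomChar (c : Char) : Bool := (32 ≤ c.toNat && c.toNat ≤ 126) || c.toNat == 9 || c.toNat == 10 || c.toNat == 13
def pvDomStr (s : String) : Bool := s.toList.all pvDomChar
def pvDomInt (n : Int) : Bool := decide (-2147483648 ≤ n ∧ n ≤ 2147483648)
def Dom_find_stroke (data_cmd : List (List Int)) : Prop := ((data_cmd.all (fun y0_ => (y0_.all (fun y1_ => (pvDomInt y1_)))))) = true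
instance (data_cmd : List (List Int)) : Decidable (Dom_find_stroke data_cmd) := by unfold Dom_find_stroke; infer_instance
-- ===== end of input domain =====

-- B is a two-stage alternative: first group the rows into maximal runs of equal
-- last-element value (run lengths), then emit the prefix sums of all but the last
-- run length; A appends indices during one stateful flag-tracking scan.

-- shared helper: d[-1] with a default (only claimed under Pre_, where every row is nonempty)
def lastVal (d : List Int) : Int := PySem.List.pyGetD d (-1) 0

-- ===== PORT A =====
def find_stroke (data_cmd : List (List Int)) : List Int :=
  let flag := lastVal (PySem.List.pyGetD data_cmd 0 [])
  let res := (PySem.List.enumerate data_cmd 0).foldl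
    (fun (s : List Int × Int) (p : Int × List Int) =>
      if s.2 ≠ lastVal p.2 then (s.1 ++ [p.1], lastVal p.2) else s)
    ([0], flag)
  res.1

-- ===== PORT B =====
-- the inner 'while' of _run_lengths: how many leading rows share last value `key`
def runCount (key : Int) : List (List Int) → Nat
  | [] => 0
  | d :: rest => if lastVal d == key then runCount key rest + 1 else 0

lemma runCount_le (key : Int) : ∀ rows : List (List Int), runCount key rows ≤ rows.length := by
  intro rows
  induction rows with
  | nil => simp [runCount]
  | cons d rest ih =>
      simp only [runCount, List.length_cons]
      split_ifs <;> omega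

-- _run_lengths: lengths of the maximal runs of equal last-element value
def runLengths : List (List Int) → List Int
  | [] => []
  | d :: rest =>
      (((runCount (lastVal d) rest : Nat) : Int) + 1) ::
        runLengths (rest.drop (runCount (lastVal d) rest))
  termination_by rows => rows.length
  decreasing_by
    have := runCount_le (lastVal d) rest
    simp only [List.length_drop, List.length_cons]
    omega

def find_stroke_alt (data_cmd : List (List Int)) : List Int :=
  let lens := runLengths data_cmd
  let res := (PySem.List.slice lens none (some (-1))).foldl
    (fun (s : List Int × Int) (L : Int) => (s.1 ++ [s.2 + L], s.2 + L))
    ([0], 0)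
  res.1

-- ===== PRECONDITION & SPEC =====
-- Pre_ excludes exactly the inputs where Python A raises IndexError: the empty list
-- (data_cmd[0]) and lists containing an empty row (data[-1]).
def Pre_find_stroke (data_cmd : List (List Int)) : Prop :=
  data_cmd ≠ [] ∧ ∀ d ∈ data_cmd, d ≠ []
instance (data_cmd : List (List Int)) : Decidable (Pre_find_stroke data_cmd) := by
  unfold Pre_find_stroke; infer_instance
def pvWitness_find_stroke : List (List Int) := [[1, 2], [3, 2], [4, 5]]

def Spec_find_stroke (data_cmd : List (List Int)) (out : List Int) : Prop := out = find_stroke_alt data_cmd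
instance (data_cmd : List (List Int)) (out : List Int) : Decidable (Spec_find_stroke data_cmd out) := by unfold Spec_find_stroke; infer_instance

-- ===== CLAIM (what is proved, stated in full; the proofs are below) =====
def Claim_equal_find_stroke : Prop := ∀ (data_cmd : List (List Int)), Dom_find_stroke data_cmd → Pre_find_stroke data_cmd → Spec_find_stroke data_cmd (find_stroke data_cmd)

-- ===== LEMMAS AND PROOFS =====

-- reference shape of A's result: the change indices of a run, given current flag and index
def changesFrom (f : Int) (k : Int) : List (List Int) → List Int
  | [] => []
  | d :: rest =>
      if f ≠ lastVal d then k :: changesFrom (lastVal d) (k + 1) rest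
      else changesFrom f (k + 1) rest

lemma foldA_eq_changesFrom (l : List (List Int)) :
    ∀ (acc : List Int) (f k : Int),
      ((PySem.List.enumerate l k).foldl
        (fun (s : List Int × Int) (p : Int × List Int) =>
          if s.2 ≠ lastVal p.2 then (s.1 ++ [p.1], lastVal p.2) else s)
        (acc, f)).1 = acc ++ changesFrom f k l := by
  induction l with
  | nil => intro acc f k; simp [PySem.List.enumerate_nil, changesFrom]
  | cons d rest ih =>
      intro acc f k
      rw [PySem.List.enumerate_cons]
      simp only [List.foldl_cons]
      by_cases h : f = lastVal d
      · subst h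
        rw [if_neg (not_not_intro rfl), ih, changesFrom, if_neg (not_not_intro rfl)]
      · rw [if_pos h, ih, changesFrom, if_pos h]
        simp

-- reference shape of B's result: running prefix sums
def partialSums (off : Int) : List Int → List Int
  | [] => []
  | L :: r => (off + L) :: partialSums (off + L) r

lemma foldB_eq_partialSums (lens : List Int) :
    ∀ (acc : List Int) (off : Int),
      (lens.foldl (fun (s : List Int × Int) (L : Int) => (s.1 ++ [s.2 + L], s.2 + L)) (acc, off)).1
        = acc ++ partialSums off lens := by
  induction lens with
  | nil => intro acc off; simp [partialSums]
  | cons L r ih =>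
      intro acc off
      rw [List.foldl_cons, ih, partialSums]
      simp

lemma take_runCount_matches (key : Int) :
    ∀ rows : List (List Int), ∀ d ∈ rows.take (runCount key rows), lastVal d = key := by
  intro rows
  induction rows with
  | nil => simp
  | cons d rest ih =>
      simp only [runCount]
      by_cases h : lastVal d = key
      · simp only [h, beq_self_eq_true, if_pos]
        intro x hx
        rcases List.mem_cons.1 (by simpa using hx) with h1 | h2
        · exact h1 ▸ h
        · exact ih x h2
      · simp [h]

lemma drop_runCount_head (key : Int) :
    ∀ rows : List (List Int), ∀ d' rest', rows.drop (runCount key rows) = d' :: rest' →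
      lastVal d' ≠ key := by
  intro rows
  induction rows with
  | nil => intro d' rest' h; simp at h
  | cons d rest ih =>
      intro d' rest' h
      simp only [runCount] at h
      by_cases hd : lastVal d = key
      · simp only [hd, beq_self_eq_true, if_pos] at h
        exact ih d' rest' h
      · have hb : ¬ (lastVal d == key) = true := by simpa using hd
        rw [if_neg hb, List.drop_zero, List.cons.injEq] at h
        exact h.1 ▸ hd

lemma changesFrom_matching_prefix (key : Int) :
    ∀ (p : List (List Int)) (q : List (List Int)) (k : Int),
      (∀ d ∈ p, lastVal d = key) →
      changesFrom key k (p ++ q) = changesFrom key (k + p.length) q := by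
  intro p
  induction p with
  | nil => intro q k _; simp
  | cons d rest ih =>
      intro q k hm
      have hd : lastVal d = key := hm d (List.mem_cons_self ..)
      rw [List.cons_append, changesFrom, if_neg (by simp [hd])]
      rw [ih q (k + 1) (fun x hx => hm x (List.mem_cons_of_mem _ hx))]
      congr 1
      simp only [List.length_cons]
      push_cast
      ring

lemma changesFrom_of_all_match (key : Int) :
    ∀ (p : List (List Int)) (k : Int), (∀ d ∈ p, lastVal d = key) →
      changesFrom key k p = [] := by
  intro p
  induction p with
  | nil => intro k _; simp [changesFrom]
  | cons d rest ih =>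
      intro k hm
      have hd : lastVal d = key := hm d (List.mem_cons_self ..)
      rw [changesFrom, if_neg (by simp [hd])]
      exact ih (k + 1) (fun x hx => hm x (List.mem_cons_of_mem _ hx))

-- the core correspondence: change indices = prefix sums of all but the last run length
lemma changes_eq_partial :
    ∀ (n : Nat) (rows : List (List Int)) (f off : Int), rows.length ≤ n →
      changesFrom f (off + 1) rows =
        partialSums off ((((runCount f rows : Nat) : Int) + 1) ::
          runLengths (rows.drop (runCount f rows))).dropLast := by
  intro n
  induction n with
  | zero =>
      intro rows f off hlen
      have : rows = [] := List.length_eq_zero_iff.1 (Nat.le_zero.1 hlen)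
      subst this
      simp [changesFrom, runCount, runLengths, partialSums]
  | succ n ih =>
      intro rows f off hlen
      have hcle : runCount f rows ≤ rows.length := runCount_le f rows
      have hsplit : rows = rows.take (runCount f rows) ++ rows.drop (runCount f rows) :=
        (List.take_append_drop _ rows).symm
      cases hdrop : rows.drop (runCount f rows) with
      | nil =>
          simp only [runLengths, List.dropLast_singleton, partialSums]
          conv_lhs => rw [hsplit, hdrop]
          simp only [List.append_nil]
          exact changesFrom_of_all_match f _ (off + 1) (take_runCount_matches f rows)
      | cons d' rest' =>
          have hne : lastVal d' ≠ f := drop_runCount_head f rows d' rest' hdrop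
          have hlen' : rest'.length ≤ n := by
            have := congrArg List.length hdrop
            simp only [List.length_drop, List.length_cons] at this
            omega
          have htake : (rows.take (runCount f rows)).length = runCount f rows :=
            List.length_take_of_le hcle
          conv_lhs => rw [hsplit, hdrop]
          rw [changesFrom_matching_prefix f (rows.take (runCount f rows)) (d' :: rest') (off + 1)
            (take_runCount_matches f rows), htake]
          rw [changesFrom, if_pos (fun h => hne h.symm)]
          rw [runLengths, List.dropLast_cons₂, partialSums, List.cons.injEq]
          refine ⟨by ring, ?_⟩
          have h2 : off + 1 + ((runCount f rows : Nat) : Int) + 1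
              = (off + (((runCount f rows : Nat) : Int) + 1)) + 1 := by ring
          rw [h2, ih rest' (lastVal d') (off + (((runCount f rows : Nat) : Int) + 1)) hlen']

-- ===== VERDICT (by name: the statement is the Claim_ definition above) =====
theorem find_stroke_spec : Claim_equal_find_stroke := by
  intro data_cmd _ hpre
  obtain ⟨hne, _⟩ := hpre
  obtain ⟨d, rest, rfl⟩ : ∃ d rest, data_cmd = d :: rest := by
    cases data_cmd with
    | nil => exact absurd rfl hne
    | cons d rest => exact ⟨d, rest, rfl⟩
  show find_stroke _ = find_stroke_alt _
  rw [find_stroke, find_stroke_alt]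
  simp only [PySem.List.slice_to_neg_one]
  rw [foldA_eq_changesFrom, foldB_eq_partialSums]
  simp only [PySem.List.pyGetD_zero_cons]
  congr 1
  rw [runLengths, changesFrom, if_neg (not_not_intro rfl)]
  have := changes_eq_partial rest.length rest (lastVal d) 0 le_rfl
  simpa using this
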